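-- pv_equiv track=rewrite | github.com/aengelke/libx86decode | parseinstrs.py | parse_mnemonics
-- ===== SOURCE A (Python) =====
-- from collections import OrderedDict, defaultdict, namedtuple, Counter
--
-- def parse_mnemonics(mnemonics):
--     mktree = lambda: defaultdict(mktree)
--     tree = mktree()
--     for m in mnemonics:
--         cur = tree
--         for c in m[::-1]:
--             cur = cur[c]
--     def tree_walk(tree, cur="\0"):
--         if not tree:
--             yield cur
--         else:
--             for el, subtree in tree.items():
--                 for path in tree_walk(subtree, el + cur):
--                     yield path
--     merged_str = "".join(sorted(tree_walk(tree)))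
--     cstr = '"' + merged_str[:-1].replace("\0", '\\0') + '"'
--     tab = [merged_str.index(m + "\0") for m in mnemonics]
--     return cstr, ",".join(map(str, tab))
-- ===== SOURCE B (Python) =====
-- def parse_mnemonics(mnemonics):
--     # dedup preserving first occurrence, then drop every string that is a
--     # proper suffix of another one (enumerate all proper suffixes once)
--     uniq = list(dict.fromkeys(mnemonics))
--     suffixes = {m[i:] for m in uniq for i in range(1, len(m) + 1)}
--     kept = sorted(m for m in uniq if m not in suffixes)
--     merged_str = "".join(m + "\0" for m in kept)
--     cstr = '"' + merged_str[:-1].replace("\0", '\\0') + '"'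
--     # one offset dictionary over all suffixes of the kept strings replaces
--     # the per-mnemonic merged_str.index scans
--     pos, off = {}, 0
--     for s in kept:
--         for i in range(len(s) + 1):
--             pos.setdefault(s[i:], off + i)
--         off += len(s) + 1
--     tab = [pos[m] for m in mnemonics]
--     return cstr, ",".join(map(str, tab))
-- ===== Notes on version B (the rewrite author's own statement) =====
-- stated objective: faster
-- what changed: B replaces A's reversed-suffix trie walk by a direct suffix-set filter (dedup, drop strings that are proper suffixes of another, sort) and replaces A's per-mnemonic merged_str.index scans by one offset dictionary over all suffixes of the kept strings.
import Mathlib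
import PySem

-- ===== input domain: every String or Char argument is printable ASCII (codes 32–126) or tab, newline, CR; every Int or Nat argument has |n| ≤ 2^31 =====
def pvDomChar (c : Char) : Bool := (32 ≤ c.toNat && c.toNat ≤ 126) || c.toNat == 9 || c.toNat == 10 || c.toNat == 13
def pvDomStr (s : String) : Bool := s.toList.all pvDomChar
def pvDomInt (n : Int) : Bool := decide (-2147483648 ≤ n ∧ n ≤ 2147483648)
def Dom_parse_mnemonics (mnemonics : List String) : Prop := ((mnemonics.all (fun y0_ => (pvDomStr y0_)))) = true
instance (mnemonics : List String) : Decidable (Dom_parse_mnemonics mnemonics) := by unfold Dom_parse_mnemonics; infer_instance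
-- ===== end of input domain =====

-- B replaces A's reversed-suffix trie by a direct suffix-set filter and A's per-mnemonic
-- merged_str.index scans by one offset dictionary over all suffixes of the kept strings (objective: faster).

-- ===== PORT A =====
def pvNul : Char := Char.ofNat 0

-- the defaultdict-of-defaultdict trie: a node with an insertion-ordered child list (mutual pair, no nested inductive)
mutual
inductive PTree where
  | node : PChildren → PTree
inductive PChildren where
  | nil : PChildren
  | cons : Char → PTree → PChildren → PChildren
end

def pvGetChild? : PChildren → Char → Option PTree
  | .nil, _ => none
  | .cons c' t r, c => if c' = c then some t else pvGetChild? r c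

-- dict write: overwrite keeps the position, a new key is appended at the end (Python dict order)
def pvSetChild : PChildren → Char → PTree → PChildren
  | .nil, c, t => .cons c t .nil
  | .cons c' t' r, c, t => if c' = c then .cons c' t r else .cons c' t' (pvSetChild r c t)

-- 'cur = tree; for c in m[::-1]: cur = cur[c]' — a missing child is a fresh empty node (defaultdict)
def pvInsert : PTree → List Char → PTree
  | t, [] => t
  | .node ch, c :: cs =>
      .node (pvSetChild ch c (pvInsert ((pvGetChild? ch c).getD (.node .nil)) cs))

-- tree_walk: a leaf yields cur, else recurse over the children in order with el + cur
mutual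
def pvWalkT : PTree → List Char → List String
  | .node .nil, cur => [String.ofList cur]
  | .node (.cons c t r), cur => pvWalkCh (.cons c t r) cur
def pvWalkCh : PChildren → List Char → List String
  | .nil, _ => []
  | .cons c t r, cur => pvWalkT t (c :: cur) ++ pvWalkCh r cur
end

def parse_mnemonics (mnemonics : List String) : String × String :=
  let tree := mnemonics.foldl (fun t m => pvInsert t m.toList.reverse) (.node .nil)  -- m[::-1] = reverse
  let merged := PySem.Str.join "" (PySem.List.sorted (pvWalkT tree [pvNul]) (fun x => x))
  let cstr := String.ofList ('"' :: (PySem.Str.replace (PySem.Str.slice merged none (some (-1))) (String.ofList [pvNul]) "\\0").toList ++ ['"'])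
  -- merged_str.index(m + "\0"): the substring is always present, so .index = .find here (proved by the claim)
  let tab := mnemonics.map (fun m => PySem.Str.find merged (String.ofList (m.toList ++ [pvNul])))
  (cstr, PySem.Str.join "," (tab.map (fun n => PySem.Int.toStr n)))

-- ===== PORT B =====
def parse_mnemonics_alt (mnemonics : List String) : String × String :=
  let uniq := PySem.List.dedup mnemonics
  let suffixes : PySem.Set String := PySem.Set.ofList (uniq.flatMap (fun m =>
      (PySem.List.pyRange 1 (PySem.Str.len m + 1) 1).map (fun i => PySem.Str.slice m (some i) none)))
  let kept := PySem.List.sorted (uniq.filter (fun m => !(PySem.Set.contains suffixes m))) (fun x => x)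
  let merged := PySem.Str.join "" (kept.map (fun m => String.ofList (m.toList ++ [pvNul])))  -- m + "\0"
  let cstr := String.ofList ('"' :: (PySem.Str.replace (PySem.Str.slice merged none (some (-1))) (String.ofList [pvNul]) "\\0").toList ++ ['"'])
  let pos := (kept.foldl (fun (st : PySem.Dict String Int × Int) s =>
      ((PySem.List.pyRange 0 (PySem.Str.len s + 1) 1).foldl
         (fun d i => PySem.Dict.setdefault d (PySem.Str.slice s (some i) none) (st.2 + i)) st.1,
       st.2 + PySem.Str.len s + 1)) (PySem.Dict.empty, 0)).1
  let tab := mnemonics.map (fun m => PySem.Dict.getD pos m 0)  -- pos[m]: the key is always present (proved by the claim)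
  (cstr, PySem.Str.join "," (tab.map (fun n => PySem.Int.toStr n)))

-- ===== PRECONDITION & SPEC =====
def Spec_parse_mnemonics (mnemonics : List String) (out : String × String) : Prop := out = parse_mnemonics_alt mnemonics
instance (mnemonics : List String) (out : String × String) : Decidable (Spec_parse_mnemonics mnemonics out) := by unfold Spec_parse_mnemonics; infer_instance

-- ===== CLAIM (what is proved, stated in full; the proofs are below) =====
def Claim_equal_parse_mnemonics : Prop := ∀ (mnemonics : List String), Dom_parse_mnemonics mnemonics → Spec_parse_mnemonics mnemonics (parse_mnemonics mnemonics)

-- ===== LEMMAS AND PROOFS =====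

-- abbreviation used throughout: m + "\0"
def pvF (m : String) : String := String.ofList (m.toList ++ [pvNul])

-- node/leaf predicates of the trie (proof-side only)
mutual
def pvHasT : PTree → List Char → Bool
  | _, [] => true
  | .node ch, c :: cs => pvHasCh ch c cs
def pvHasCh : PChildren → Char → List Char → Bool
  | .nil, _, _ => false
  | .cons c' t r, c, cs => if c' = c then pvHasT t cs else pvHasCh r c cs
end

mutual
def pvLeafT : PTree → List Char → Bool
  | .node .nil, [] => true
  | .node (.cons _ _ _), [] => false
  | .node ch, c :: cs => pvLeafCh ch c cs
def pvLeafCh : PChildren → Char → List Char → Bool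
  | .nil, _, _ => false
  | .cons c' t r, c, cs => if c' = c then pvLeafT t cs else pvLeafCh r c cs
end

def pvKeys : PChildren → List Char
  | .nil => []
  | .cons c _ r => c :: pvKeys r

mutual
def pvWfT : PTree → Bool
  | .node ch => pvWfCh ch
def pvWfCh : PChildren → Bool
  | .nil => true
  | .cons c t r => !(pvKeys r).contains c && pvWfT t && pvWfCh r
end

-- maximal mnemonic: not a proper suffix of another one
def pvMaxim (ms : List String) (m : String) : Prop :=
  m ∈ ms ∧ ∀ x ∈ ms, m.toList <:+ x.toList → x = m


-- offset of the first kept block having mL as a suffix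
def pvAns : List (List Char) → List Char → Nat
  | [], _ => 0
  | b :: bs, mL => if mL <:+ b then b.length - mL.length else b.length + 1 + pvAns bs mL

theorem pv_getChild_setChild : ∀ (ch : PChildren) (c : Char) (t : PTree) (c' : Char),
    pvGetChild? (pvSetChild ch c t) c' = if c' = c then some t else pvGetChild? ch c'
  | .nil, c, t, c' => by
      by_cases h : c = c' <;> simp_all [pvSetChild, pvGetChild?, eq_comm]
  | .cons c0 t0 r, c, t, c' => by
      by_cases h0 : c0 = c <;> by_cases h : c0 = c' <;>
        simp_all [pvSetChild, pvGetChild?, pv_getChild_setChild r c t c', eq_comm]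

theorem pv_hasCh_eq : ∀ (ch : PChildren) (c : Char) (cs : List Char),
    pvHasCh ch c cs = (match pvGetChild? ch c with | none => false | some t => pvHasT t cs)
  | .nil, c, cs => by simp [pvHasCh, pvGetChild?]
  | .cons c0 t0 r, c, cs => by
      by_cases h : c0 = c <;> simp [pvHasCh, pvGetChild?, h, pv_hasCh_eq r c cs]

theorem pv_leafCh_eq : ∀ (ch : PChildren) (c : Char) (cs : List Char),
    pvLeafCh ch c cs = (match pvGetChild? ch c with | none => false | some t => pvLeafT t cs)
  | .nil, c, cs => by simp [pvLeafCh, pvGetChild?]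
  | .cons c0 t0 r, c, cs => by
      by_cases h : c0 = c <;> simp [pvLeafCh, pvGetChild?, h, pv_leafCh_eq r c cs]

theorem pv_hasT_nil (t : PTree) : pvHasT t [] = true := by
  cases t; rfl

theorem pv_hasT_empty (p : List Char) : pvHasT (.node .nil) p = decide (p = []) := by
  cases p with
  | nil => simp [pvHasT]
  | cons c cs => simp [pvHasT, pvHasCh]

-- T1
theorem pv_hasT_insert (w : List Char) : ∀ (t : PTree) (p : List Char),
    pvHasT (pvInsert t w) p = (pvHasT t p || decide (p <+: w)) := by
  induction w with
  | nil =>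
      intro t p
      cases p with
      | nil => simp [pvInsert, pv_hasT_nil]
      | cons c cs => simp [pvInsert]
  | cons c cs ih =>
      intro t p
      cases t with
      | node ch =>
        cases p with
        | nil => simp [pv_hasT_nil]
        | cons c' ps =>
            show pvHasCh (pvSetChild ch c (pvInsert ((pvGetChild? ch c).getD (.node .nil)) cs)) c' ps = _
            rw [pv_hasCh_eq, pv_getChild_setChild]
            by_cases h : c' = c
            · subst h
              rw [if_pos rfl]
              show pvHasT (pvInsert ((pvGetChild? ch c').getD (.node .nil)) cs) ps = _
              rw [ih]
              cases hg : pvGetChild? ch c' with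
              | none =>
                  simp [pv_hasT_empty, pvHasT, pv_hasCh_eq, hg, List.cons_prefix_cons]
                  rcases ps with _ | ⟨a, ps⟩ <;> simp
              | some t0 =>
                  simp [pvHasT, pv_hasCh_eq, hg, List.cons_prefix_cons]
            · rw [if_neg h, ← pv_hasCh_eq]
              show _ = (pvHasT (.node ch) (c' :: ps) || _)
              simp [pvHasT, List.cons_prefix_cons, h]

-- T2: a leaf is a node with no one-step extension
theorem pv_leafT_iff (p : List Char) : ∀ (t : PTree),
    pvLeafT t p = true ↔ pvHasT t p = true ∧ ∀ c, pvHasT t (p ++ [c]) = false := by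
  induction p with
  | nil =>
      intro t
      cases t with
      | node ch =>
        have h1 : ∀ c, pvHasT (PTree.node ch) ([] ++ [c]) = pvHasCh ch c [] := by
          intro c; rfl
        constructor
        · intro h
          cases ch with
          | nil =>
              refine ⟨pv_hasT_nil _, fun c => ?_⟩
              rw [h1, pv_hasCh_eq]
              simp [pvGetChild?]
          | cons c0 t0 r => simp [pvLeafT] at h
        · rintro ⟨-, h2⟩
          cases ch with
          | nil => rfl
          | cons c0 t0 r =>
              have := h2 c0
              rw [h1, pv_hasCh_eq] at this
              simp [pvGetChild?, pv_hasT_nil] at this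
  | cons c ps ih =>
      intro t
      cases t with
      | node ch =>
        have hl : pvLeafT (PTree.node ch) (c :: ps) = pvLeafCh ch c ps := by cases ch <;> rfl
        have hh : pvHasT (PTree.node ch) (c :: ps) = pvHasCh ch c ps := rfl
        have hext : ∀ c', pvHasT (PTree.node ch) ((c :: ps) ++ [c']) = pvHasCh ch c (ps ++ [c']) := by
          intro c'; rfl
        rw [hl, pv_leafCh_eq]
        cases hg : pvGetChild? ch c with
        | none =>
            simp only []
            constructor
            · intro h; simp at h
            · rintro ⟨h1, -⟩
              rw [hh, pv_hasCh_eq, hg] at h1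
              simp at h1
        | some t0 =>
            simp only []
            rw [ih t0]
            constructor
            · rintro ⟨h1, h2⟩
              refine ⟨by rw [hh, pv_hasCh_eq, hg]; exact h1, fun c' => ?_⟩
              rw [hext, pv_hasCh_eq, hg]; exact h2 c'
            · rintro ⟨h1, h2⟩
              refine ⟨by rw [hh, pv_hasCh_eq, hg] at h1; exact h1, fun c' => ?_⟩
              have := h2 c'
              rw [hext, pv_hasCh_eq, hg] at this; exact this

theorem pv_leafT_empty_iff (p : List Char) : pvLeafT (.node .nil) p = true ↔ p = [] := by
  cases p with
  | nil => simp [pvLeafT]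
  | cons c cs => simp [pvLeafT, pvLeafCh]

theorem pv_leafT_cons_iff (c0 : Char) (t0 : PTree) (r : PChildren) (p : List Char) :
    pvLeafT (.node (.cons c0 t0 r)) p = true ↔
      ∃ c cs, p = c :: cs ∧ pvLeafCh (.cons c0 t0 r) c cs = true := by
  cases p with
  | nil => simp [pvLeafT]
  | cons c cs =>
      constructor
      · intro h; exact ⟨c, cs, rfl, h⟩
      · rintro ⟨c', cs', heq, h⟩
        cases heq; exact h

theorem pv_leafCh_key : ∀ (ch : PChildren) (c : Char) (cs : List Char),
    pvLeafCh ch c cs = true → c ∈ pvKeys ch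
  | .nil, c, cs => by simp [pvLeafCh]
  | .cons c0 t0 r, c, cs => by
      by_cases hc : c0 = c
      · subst hc; simp [pvKeys]
      · intro h
        simp only [pvLeafCh, if_neg hc] at h
        simp [pvKeys, pv_leafCh_key r c cs h]

theorem pv_wfCh_cons_iff (c0 : Char) (t0 : PTree) (r : PChildren) :
    pvWfCh (.cons c0 t0 r) = true ↔
      (pvKeys r).contains c0 = false ∧ pvWfT t0 = true ∧ pvWfCh r = true := by
  simp [pvWfCh, and_assoc]

mutual
theorem pv_mem_walkT : ∀ (t : PTree), pvWfT t = true → ∀ (cur : List Char) (l : String),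
    (l ∈ pvWalkT t cur ↔ ∃ p, pvLeafT t p = true ∧ l = String.ofList (p.reverse ++ cur))
  | .node .nil, _, cur, l => by
      simp only [pvWalkT, List.mem_singleton]
      constructor
      · intro h; exact ⟨[], rfl, by simpa using h⟩
      · rintro ⟨p, hp, rfl⟩
        rw [pv_leafT_empty_iff] at hp
        subst hp; simp
  | .node (.cons c0 t0 r), hwf, cur, l => by
      show l ∈ pvWalkCh (.cons c0 t0 r) cur ↔ _
      rw [pv_mem_walkCh (.cons c0 t0 r) hwf cur l]
      constructor
      · rintro ⟨c, cs, h, rfl⟩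
        exact ⟨c :: cs, (pv_leafT_cons_iff c0 t0 r (c :: cs)).mpr ⟨c, cs, rfl, h⟩, by simp⟩
      · rintro ⟨p, hp, rfl⟩
        rw [pv_leafT_cons_iff] at hp
        obtain ⟨c, cs, rfl, h⟩ := hp
        exact ⟨c, cs, h, by simp⟩
theorem pv_mem_walkCh : ∀ (ch : PChildren), pvWfCh ch = true → ∀ (cur : List Char) (l : String),
    (l ∈ pvWalkCh ch cur ↔ ∃ c cs, pvLeafCh ch c cs = true ∧ l = String.ofList (cs.reverse ++ c :: cur))
  | .nil, _, cur, l => by simp [pvWalkCh, pvLeafCh]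
  | .cons c0 t0 r, hwf, cur, l => by
      rw [pv_wfCh_cons_iff] at hwf
      obtain ⟨hk, hwt, hwr⟩ := hwf
      show l ∈ pvWalkT t0 (c0 :: cur) ++ pvWalkCh r cur ↔ _
      rw [List.mem_append, pv_mem_walkT t0 hwt (c0 :: cur) l, pv_mem_walkCh r hwr cur l]
      constructor
      · rintro (⟨p, hp, rfl⟩ | ⟨c, cs, h, rfl⟩)
        · exact ⟨c0, p, by simp [pvLeafCh, hp], rfl⟩
        · have hc : c0 ≠ c := by
            rintro rfl
            have := pv_leafCh_key r c0 cs h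
            simp [List.contains_eq_mem, this] at hk
          exact ⟨c, cs, by simp [pvLeafCh, hc, h], rfl⟩
      · rintro ⟨c, cs, h, rfl⟩
        by_cases hc : c0 = c
        · subst hc
          simp only [pvLeafCh, if_pos rfl] at h
          exact Or.inl ⟨cs, h, rfl⟩
        · simp only [pvLeafCh, if_neg hc] at h
          exact Or.inr ⟨c, cs, h, rfl⟩
end

theorem pv_keys_setChild : ∀ (ch : PChildren) (c : Char) (t : PTree),
    pvKeys (pvSetChild ch c t) = if (pvKeys ch).contains c then pvKeys ch else pvKeys ch ++ [c]
  | .nil, c, t => by simp [pvSetChild, pvKeys]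
  | .cons c0 t0 r, c, t => by
      by_cases hc : c0 = c
      · subst hc; simp [pvSetChild, pvKeys]
      · have hb : (c == c0) = false := by simp [Ne.symm hc]
        simp only [pvSetChild, if_neg hc, pvKeys, pv_keys_setChild r c t, List.contains_cons, hb,
          Bool.false_or]
        by_cases h : c ∈ pvKeys r <;> simp [h]

theorem pv_wf_getChild : ∀ (ch : PChildren) (c : Char) (t : PTree),
    pvWfCh ch = true → pvGetChild? ch c = some t → pvWfT t = true
  | .nil, c, t => by simp [pvGetChild?]
  | .cons c0 t0 r, c, t => by
      intro hwf hg
      rw [pv_wfCh_cons_iff] at hwf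
      by_cases hc : c0 = c
      · subst hc
        simp only [pvGetChild?, if_pos rfl] at hg
        cases hg; exact hwf.2.1
      · simp only [pvGetChild?, if_neg hc] at hg
        exact pv_wf_getChild r c t hwf.2.2 hg

theorem pv_wf_setChild : ∀ (ch : PChildren) (c : Char) (t : PTree),
    pvWfCh ch = true → pvWfT t = true → pvWfCh (pvSetChild ch c t) = true
  | .nil, c, t => by
      intro _ hwt
      simp [pvSetChild, pv_wfCh_cons_iff, pvKeys, hwt, pvWfCh]
  | .cons c0 t0 r, c, t => by
      intro hwf hwt
      rw [pv_wfCh_cons_iff] at hwf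
      obtain ⟨hk, hw0, hwr⟩ := hwf
      by_cases hc : c0 = c
      · subst hc
        have hs : pvSetChild (.cons c0 t0 r) c0 t = .cons c0 t r := by simp [pvSetChild]
        rw [hs, pv_wfCh_cons_iff]
        exact ⟨hk, hwt, hwr⟩
      · have hs : pvSetChild (.cons c0 t0 r) c t = .cons c0 t0 (pvSetChild r c t) := by
          simp [pvSetChild, hc]
        rw [hs, pv_wfCh_cons_iff]
        refine ⟨?_, hw0, pv_wf_setChild r c t hwr hwt⟩
        rw [pv_keys_setChild]
        by_cases h : (pvKeys r).contains c <;>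
          simp_all [List.contains_eq_mem, Ne.symm hc]

theorem pv_wf_insert (w : List Char) : ∀ (t : PTree), pvWfT t = true → pvWfT (pvInsert t w) = true := by
  induction w with
  | nil => intro t h; exact h
  | cons c cs ih =>
      intro t h
      cases t with
      | node ch =>
        show pvWfCh (pvSetChild ch c (pvInsert ((pvGetChild? ch c).getD (.node .nil)) cs)) = true
        refine pv_wf_setChild ch c _ h (ih _ ?_)
        cases hg : pvGetChild? ch c with
        | none => rfl
        | some t0 => exact pv_wf_getChild ch c t0 h hg

mutual
theorem pv_nodup_walkT : ∀ (t : PTree), pvWfT t = true → ∀ (cur : List Char),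
    (pvWalkT t cur).Nodup
  | .node .nil, _, cur => by simp [pvWalkT]
  | .node (.cons c0 t0 r), hwf, cur => pv_nodup_walkCh (.cons c0 t0 r) hwf cur
theorem pv_nodup_walkCh : ∀ (ch : PChildren), pvWfCh ch = true → ∀ (cur : List Char),
    (pvWalkCh ch cur).Nodup
  | .nil, _, cur => by simp [pvWalkCh]
  | .cons c0 t0 r, hwf, cur => by
      rw [pv_wfCh_cons_iff] at hwf
      obtain ⟨hk, hwt, hwr⟩ := hwf
      show (pvWalkT t0 (c0 :: cur) ++ pvWalkCh r cur).Nodup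
      rw [List.nodup_append]
      refine ⟨pv_nodup_walkT t0 hwt (c0 :: cur), pv_nodup_walkCh r hwr cur, ?_⟩
      intro l hl l2 hl2
      rintro rfl
      rw [pv_mem_walkT t0 hwt (c0 :: cur) l] at hl
      rw [pv_mem_walkCh r hwr cur l] at hl2
      obtain ⟨p, -, rfl⟩ := hl
      obtain ⟨c, cs, hlf, heq⟩ := hl2
      have hc : c ≠ c0 := by
        rintro rfl
        have := pv_leafCh_key r c cs hlf
        simp [List.contains_eq_mem, this] at hk
      have : p.reverse ++ c0 :: cur = cs.reverse ++ c :: cur := by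
        have := congrArg String.toList heq
        simpa using this
      have h2 : (p.reverse ++ [c0]) ++ cur = (cs.reverse ++ [c]) ++ cur := by
        simpa [List.append_assoc] using this
    -- cancel the common suffix, then compare last elements
      have h3 : p.reverse ++ [c0] = cs.reverse ++ [c] := by
        exact List.append_cancel_right h2
      have : c0 = c := by
        have := congrArg (fun xs => xs.getLast?) h3
        simpa [List.getLast?_append] using this
      exact hc this.symm
end

def pvBuild (ms : List String) : PTree :=
  ms.foldl (fun t m => pvInsert t m.toList.reverse) (.node .nil)

theorem pv_wf_build (ms : List String) : pvWfT (pvBuild ms) = true := by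
  suffices h : ∀ (t : PTree), pvWfT t = true →
      pvWfT (ms.foldl (fun t m => pvInsert t m.toList.reverse) t) = true by
    exact h (.node .nil) rfl
  induction ms with
  | nil => intro t h; exact h
  | cons m ms ih =>
      intro t h
      exact ih _ (pv_wf_insert m.toList.reverse t h)

theorem pv_hasT_build (ms : List String) (p : List Char) :
    pvHasT (pvBuild ms) p = (decide (p = []) || ms.any (fun m => decide (p <+: m.toList.reverse))) := by
  suffices h : ∀ (t : PTree),
      pvHasT (ms.foldl (fun t m => pvInsert t m.toList.reverse) t) p
        = (pvHasT t p || ms.any (fun m => decide (p <+: m.toList.reverse))) by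
    have h2 := h (.node .nil)
    rw [pv_hasT_empty] at h2
    exact h2
  induction ms with
  | nil => intro t; simp
  | cons m ms ih =>
      intro t
      rw [List.foldl_cons, ih (pvInsert t m.toList.reverse), pv_hasT_insert]
      simp [Bool.or_assoc]

-- a proper prefix extends by one character
theorem pv_proper_prefix (p w : List Char) (h : p <+: w) (hne : p ≠ w) :
    ∃ c, p ++ [c] <+: w := by
  obtain ⟨t, rfl⟩ := h
  cases t with
  | nil => simp at hne
  | cons c t' => exact ⟨c, t', by simp⟩

theorem pv_leaf_build_iff (ms : List String) (hne : ms ≠ []) (p : List Char) :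
    pvLeafT (pvBuild ms) p = true ↔
      ∃ m, (m ∈ ms ∧ p = m.toList.reverse) ∧ ∀ x ∈ ms, m.toList <:+ x.toList → x = m := by
  rw [pv_leafT_iff]
  constructor
  · rintro ⟨h1, h2⟩
    rw [pv_hasT_build] at h1
    have hext : ∀ x ∈ ms, p <+: x.toList.reverse → p = x.toList.reverse := by
      intro x hx hpre
      by_contra hne2
      obtain ⟨c, hc⟩ := pv_proper_prefix _ _ hpre hne2
      have := h2 c
      rw [pv_hasT_build] at this
      simp only [Bool.or_eq_false_iff, List.any_eq_false] at this
      exact absurd hc (by simpa using this.2 x hx)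
    simp only [Bool.or_eq_true, decide_eq_true_eq, List.any_eq_true] at h1
    rcases h1 with hp0 | ⟨m, hm, hpre⟩
    · -- p = []: every mnemonic must be empty, and one exists since ms ≠ []
      subst hp0
      obtain ⟨m, hm⟩ := List.exists_mem_of_ne_nil ms hne
      have hall : ∀ x ∈ ms, x.toList = [] := by
        intro x hx
        by_contra hx0
        have hpre : [] <+: x.toList.reverse := List.nil_prefix
        have := hext x hx hpre
        simp [List.reverse_eq_nil_iff] at this
        exact hx0 (by simp [this])
      refine ⟨m, ⟨hm, by simp [hall m hm]⟩, ?_⟩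
      intro x hx _
      have h1 := hall x hx
      have h2 := hall m hm
      have : x.toList = m.toList := by rw [h1, h2]
      exact String.toList_inj.mp this
    · have hpm : p = m.toList.reverse := hext m hm hpre
      subst hpm
      refine ⟨m, ⟨hm, rfl⟩, ?_⟩
      intro x hx hsuf
      have hpre2 : m.toList.reverse <+: x.toList.reverse := by
        simpa [List.reverse_prefix] using hsuf
      have := hext x hx hpre2
      have : x.toList = m.toList := by
        have := congrArg List.reverse this
        simpa using this.symm
      exact String.toList_inj.mp this
  · rintro ⟨m, ⟨hm, rfl⟩, hmax⟩
    constructor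
    · rw [pv_hasT_build]
      simp only [Bool.or_eq_true, decide_eq_true_eq, List.any_eq_true]
      exact Or.inr ⟨m, hm, List.prefix_refl _⟩
    · intro c
      rw [pv_hasT_build]
      simp only [Bool.or_eq_false_iff, List.any_eq_false]
      refine ⟨by simp, ?_⟩
      intro x hx
      intro hpre
      rw [decide_eq_true_eq] at hpre
      have hsuf : m.toList <:+ x.toList := by
        have h1 : m.toList.reverse <+: x.toList.reverse := (List.prefix_append _ _).trans hpre
        simpa [List.reverse_prefix] using h1
      have hxm := hmax x hx hsuf
      subst hxm
      have := hpre.length_le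
      simp only [List.length_append, List.length_reverse, List.length_cons,
        List.length_nil] at this
      omega

-- A's walk over the built trie, in closed form
theorem pv_mem_walkA (ms : List String) (hne : ms ≠ []) (l : String) :
    l ∈ pvWalkT (pvBuild ms) [pvNul] ↔ ∃ m, pvMaxim ms m ∧ l = pvF m := by
  rw [pv_mem_walkT (pvBuild ms) (pv_wf_build ms) [pvNul] l]
  constructor
  · rintro ⟨p, hp, rfl⟩
    rw [pv_leaf_build_iff ms hne] at hp
    obtain ⟨m, ⟨hm, rfl⟩, hmax⟩ := hp
    exact ⟨m, ⟨hm, hmax⟩, by simp [pvF]⟩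
  · rintro ⟨m, ⟨hm, hmax⟩, rfl⟩
    refine ⟨m.toList.reverse, ?_, by simp [pvF]⟩
    rw [pv_leaf_build_iff ms hne]
    exact ⟨m, ⟨hm, rfl⟩, hmax⟩

-- B-side mirrors of the let-bound values of parse_mnemonics_alt
def pvUniq (ms : List String) : List String := PySem.List.dedup ms

def pvSuffixes (ms : List String) : PySem.Set String :=
  PySem.Set.ofList ((pvUniq ms).flatMap (fun m =>
    (PySem.List.pyRange 1 (PySem.Str.len m + 1) 1).map (fun i => PySem.Str.slice m (some i) none)))

def pvKeptRaw (ms : List String) : List String :=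
  (pvUniq ms).filter (fun m => !(PySem.Set.contains (pvSuffixes ms) m))

def pvKept (ms : List String) : List String := PySem.List.sorted (pvKeptRaw ms) (fun x => x)

theorem pv_mem_suffixes (ms : List String) (m : String) :
    PySem.Set.contains (pvSuffixes ms) m = true ↔
      ∃ x ∈ ms, m.toList <:+ x.toList ∧ m.toList.length < x.toList.length := by
  rw [PySem.Set.contains_iff, pvSuffixes, PySem.Set.mem_ofList, List.mem_flatMap]
  constructor
  · rintro ⟨x, hx, hmem⟩
    rw [List.mem_map] at hmem
    obtain ⟨i, hi, rfl⟩ := hmem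
    rw [PySem.List.mem_pyRange_one] at hi
    rw [pvUniq, PySem.List.mem_dedup] at hx
    refine ⟨x, hx, ?_⟩
    rw [PySem.Str.len_eq] at hi
    have h0 : (0:Int) ≤ i := by omega
    have htl : (PySem.Str.slice x (some i) none).toList = x.toList.drop i.toNat := by
      rw [PySem.Str.toList_slice]
      exact PySem.List.slice_from x.toList h0
    have h1 : 1 ≤ i.toNat := by omega
    have h2 : i.toNat ≤ x.toList.length := by omega
    constructor
    · rw [htl]; exact List.drop_suffix _ _
    · rw [htl, List.length_drop]; omega
  · rintro ⟨x, hx, hsuf, hlen⟩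
    refine ⟨x, by rw [pvUniq, PySem.List.mem_dedup]; exact hx, ?_⟩
    rw [List.mem_map]
    obtain ⟨t, ht⟩ := hsuf
    have hk : t.length + m.toList.length = x.toList.length := by
      rw [← ht]; simp
    refine ⟨(t.length : Int), ?_, ?_⟩
    · rw [PySem.List.mem_pyRange_one, PySem.Str.len_eq]
      omega
    · symm
      rw [← String.toList_inj, PySem.Str.toList_slice]
      have hcs : PySem.Chars.slice x.toList (some (t.length : Int)) none
          = x.toList.drop ((t.length : Int)).toNat :=
        PySem.List.slice_from x.toList (Int.natCast_nonneg _)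
      rw [hcs]
      have : ((t.length : Int)).toNat = t.length := by omega
      rw [this, ← ht, List.drop_left]

theorem pv_mem_keptRaw (ms : List String) (m : String) :
    m ∈ pvKeptRaw ms ↔ pvMaxim ms m := by
  rw [pvKeptRaw, List.mem_filter]
  rw [pvUniq, PySem.List.mem_dedup]
  rw [Bool.not_eq_eq_eq_not, Bool.not_true, ← Bool.not_eq_true, pv_mem_suffixes]
  constructor
  · rintro ⟨hm, hno⟩
    refine ⟨hm, ?_⟩
    intro x hx hsuf
    by_contra hne
    apply hno
    refine ⟨x, hx, hsuf, ?_⟩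
    have hle := hsuf.length_le
    rcases lt_or_eq_of_le hle with h | h
    · exact h
    · exact absurd (String.toList_inj.mp (hsuf.eq_of_length h)).symm hne
  · rintro ⟨hm, hmax⟩
    refine ⟨hm, ?_⟩
    rintro ⟨x, hx, hsuf, hlen⟩
    have := hmax x hx hsuf
    subst this
    omega

theorem pv_nodup_keptRaw (ms : List String) : (pvKeptRaw ms).Nodup :=
  (PySem.List.nodup_dedup ms).filter _

theorem pv_f_injective : Function.Injective pvF := by
  intro a b h
  rw [pvF, pvF] at h
  have := congrArg String.toList h
  simp only [String.toList_ofList] at this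
  exact String.toList_inj.mp (List.append_cancel_right this)

theorem pv_dom_nul_lt (ms : List String) (hdom : Dom_parse_mnemonics ms)
    {m : String} (hm : m ∈ ms) {c : Char} (hc : c ∈ m.toList) : pvNul < c := by
  rw [Dom_parse_mnemonics, List.all_eq_true] at hdom
  have h1 := hdom m hm
  rw [pvDomStr, List.all_eq_true] at h1
  have h2 := h1 c hc
  rw [pvDomChar] at h2
  have h9 : 9 ≤ c.toNat := by
    simp only [Bool.or_eq_true, Bool.and_eq_true, decide_eq_true_eq, beq_iff_eq] at h2
    omega
  rw [pvNul, Char.lt_def, UInt32.lt_iff_toNat_lt]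
  have hz : (Char.ofNat 0).val.toNat = 0 := rfl
  have hcv : c.val.toNat = c.toNat := rfl
  omega

theorem pv_lex_append_nul : ∀ {a b : List Char}, List.Lex (· < ·) a b →
    (∀ c ∈ b, pvNul < c) → List.Lex (· < ·) (a ++ [pvNul]) (b ++ [pvNul]) := by
  intro a b h
  induction h with
  | nil => intro hb; exact List.Lex.rel (hb _ (by simp))
  | @rel a l₁ b l₂ hr => intro hb; exact List.Lex.rel hr
  | @cons a l₁ l₂ h ih =>
      intro hb
      exact List.Lex.cons (ih (fun c hc => hb c (by simp [hc])))

theorem pv_f_lt (m₁ m₂ : String) (h : m₁ < m₂) (hb : ∀ c ∈ m₂.toList, pvNul < c) :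
    pvF m₁ < pvF m₂ := by
  rw [String.lt_iff_toList_lt] at h ⊢
  have h1 : List.Lex (· < ·) m₁.toList m₂.toList := h
  have h2 := pv_lex_append_nul h1 hb
  show List.Lex (· < ·) (pvF m₁).toList (pvF m₂).toList
  simpa [pvF] using h2

-- the central identity: A's sorted leaf strings are exactly B's kept strings with "\0" appended
theorem pv_sorted_walk (ms : List String) (hne : ms ≠ []) (hdom : Dom_parse_mnemonics ms) :
    PySem.List.sorted (pvWalkT (pvBuild ms) [pvNul]) (fun x => x) = (pvKept ms).map pvF := by
  apply PySem.List.sorted_eq_of_perm_of_pairwise_lt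
  · -- permutation
    have hperm1 : (pvKept ms).Perm (pvKeptRaw ms) := PySem.List.sorted_perm _ _ _
    have hnd_kept : (pvKept ms).Nodup := (hperm1.symm).nodup (pv_nodup_keptRaw ms)
    have hnd_map : ((pvKept ms).map pvF).Nodup := hnd_kept.map pv_f_injective
    have hnd_walk : (pvWalkT (pvBuild ms) [pvNul]).Nodup :=
      pv_nodup_walkT (pvBuild ms) (pv_wf_build ms) [pvNul]
    rw [List.perm_ext_iff_of_nodup hnd_map hnd_walk]
    intro l
    rw [pv_mem_walkA ms hne l, List.mem_map]
    constructor
    · rintro ⟨m, hm, rfl⟩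
      rw [pvKept, PySem.List.mem_sorted, pv_mem_keptRaw] at hm
      exact ⟨m, hm, rfl⟩
    · rintro ⟨m, hm, rfl⟩
      refine ⟨m, ?_, rfl⟩
      rw [pvKept, PySem.List.mem_sorted, pv_mem_keptRaw]
      exact hm
  · -- strictly increasing
    rw [List.pairwise_map]
    have hle : (pvKept ms).Pairwise (fun a b => a ≤ b) := PySem.List.sorted_pairwise _ _
    have hnd : (pvKept ms).Nodup := ((PySem.List.sorted_perm _ _ _).symm).nodup (pv_nodup_keptRaw ms)
    have hlt : (pvKept ms).Pairwise (fun a b => a < b) :=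
      (hle.and hnd).imp (fun h => lt_of_le_of_ne h.1 h.2)
    refine hlt.imp_of_mem ?_
    intro a b ha hb h
    apply pv_f_lt a b h
    intro c hc
    have hbm : b ∈ ms := by
      rw [pvKept, PySem.List.mem_sorted, pv_mem_keptRaw] at hb
      exact hb.1
    exact pv_dom_nul_lt ms hdom hbm hc

theorem pv_join_nil_flatten (L : List (List Char)) : PySem.Chars.join [] L = L.flatten := by
  induction L with
  | nil => rfl
  | cons b L ih =>
      cases L with
      | nil => simp [PySem.Chars.join, List.intercalate]
      | cons b2 L2 => rw [PySem.Chars.join_cons_cons]; simp_all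

-- the merged block list
def pvFlat (bs : List (List Char)) : List Char := (bs.map (fun b => b ++ [pvNul])).flatten

theorem pv_find_eq_of (s sub : List Char) (k : Nat) (hp : sub <+: s.drop k)
    (hmin : ∀ i < k, ¬ sub <+: s.drop i) : PySem.Chars.find s sub = (k : Int) := by
  have hinf : sub <:+: s := hp.isInfix.trans (List.drop_suffix k s).isInfix
  have h0 : 0 ≤ PySem.Chars.find s sub := (PySem.Chars.find_nonneg_iff s sub).mpr hinf
  obtain ⟨hsp, hsm⟩ := PySem.Chars.find_spec h0
  rcases Nat.lt_trichotomy (PySem.Chars.find s sub).toNat k with h | h | h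
  · exact absurd hsp (hmin _ h)
  · omega
  · exact absurd hp (hsm k h)

theorem pv_exist_prefix : ∀ (bs : List (List Char)) (mL : List Char),
    (∃ b ∈ bs, mL <:+ b) → (mL ++ [pvNul]) <+: (pvFlat bs).drop (pvAns bs mL)
  | [], mL => by rintro ⟨b, h, -⟩; simp at h
  | b :: bs, mL => by
      rintro hex
      by_cases hsuf : mL <:+ b
      · obtain ⟨t, ht⟩ := hsuf
        have hk : pvAns (b :: bs) mL = b.length - mL.length := by
          simp only [pvAns]; rw [if_pos ⟨t, ht⟩]
        have hlen : t.length + mL.length = b.length := by rw [← ht]; simp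
        have hdrop : (pvFlat (b :: bs)).drop (b.length - mL.length)
            = mL ++ [pvNul] ++ pvFlat bs := by
          show ((b ++ [pvNul]) ++ pvFlat bs).drop (b.length - mL.length) = _
          rw [List.drop_append]
          have h1 : (b ++ [pvNul]).drop (b.length - mL.length) = mL ++ [pvNul] := by
            rw [List.drop_append]
            have : b.drop (b.length - mL.length) = mL := by
              have : b.length - mL.length = t.length := by omega
              rw [this, ← ht, List.drop_left]
            rw [this]
            have : b.length - mL.length - b.length = 0 := by omega
            rw [this]; simp
          rw [h1]
          have : b.length - mL.length - (b ++ [pvNul]).length = 0 := by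
            simp only [List.length_append, List.length_cons, List.length_nil]
            omega
          rw [this]; simp
        rw [hk, hdrop]
        exact List.prefix_append _ _
      · have hk : pvAns (b :: bs) mL = b.length + 1 + pvAns bs mL := by
          simp only [pvAns]; rw [if_neg hsuf]
        have hex' : ∃ b' ∈ bs, mL <:+ b' := by
          obtain ⟨b', hb', hs⟩ := hex
          rcases List.mem_cons.mp hb' with rfl | h
          · exact absurd hs hsuf
          · exact ⟨b', h, hs⟩
        have hdrop : (pvFlat (b :: bs)).drop (pvAns (b :: bs) mL)
            = (pvFlat bs).drop (pvAns bs mL) := by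
          show ((b ++ [pvNul]) ++ pvFlat bs).drop (pvAns (b :: bs) mL) = _
          rw [List.drop_append, hk]
          have h1 : (b ++ [pvNul]).drop (b.length + 1 + pvAns bs mL) = [] := by
            apply List.drop_eq_nil_of_le
            simp only [List.length_append, List.length_cons, List.length_nil]
            omega
          rw [h1]
          have : b.length + 1 + pvAns bs mL - (b ++ [pvNul]).length = pvAns bs mL := by
            simp only [List.length_append, List.length_cons, List.length_nil]
            omega
          rw [this]; simp
        rw [hdrop]
        exact pv_exist_prefix bs mL hex'

theorem pv_flat_cons (b : List Char) (bs : List (List Char)) :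
    pvFlat (b :: bs) = (b ++ [pvNul]) ++ pvFlat bs := by
  simp [pvFlat]

theorem pv_min_prefix : ∀ (bs : List (List Char)) (mL : List Char),
    (∀ b' ∈ bs, pvNul ∉ b') → pvNul ∉ mL →
    ∀ i, i < pvAns bs mL → ¬ (mL ++ [pvNul]) <+: (pvFlat bs).drop i
  | [], mL => by intro _ _ i hi; simp [pvAns] at hi
  | b :: bs, mL => by
      intro hb hm i hi hpre
      rw [pv_flat_cons] at hpre
      have hlen_drop := hpre.length_le
      simp only [List.length_drop, List.length_append, List.length_cons,
        List.length_nil] at hlen_drop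
      have hLlen : ((b ++ [pvNul]) ++ pvFlat bs).length = b.length + 1 + (pvFlat bs).length := by
        simp only [List.length_append, List.length_cons, List.length_nil] <;> omega
      have hchar : ∀ j, j < mL.length + 1 → ∀ (h1 : j < (mL ++ [pvNul]).length)
          (h2 : i + j < ((b ++ [pvNul]) ++ pvFlat bs).length),
          (mL ++ [pvNul])[j]'h1 = ((b ++ [pvNul]) ++ pvFlat bs)[i + j]'h2 := by
        intro j hj h1 h2
        have h3 : j < (((b ++ [pvNul]) ++ pvFlat bs).drop i).length := by
          rw [List.length_drop]
          simp only [List.length_append, List.length_cons, List.length_nil] at h2 ⊢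
          omega
        have := hpre.getElem (i := j) (by simpa using h1)
        rw [this]
        exact List.getElem_drop
      have hblen : b.length < ((b ++ [pvNul]) ++ pvFlat bs).length := by omega
      have hLnul : ((b ++ [pvNul]) ++ pvFlat bs)[b.length]'hblen = pvNul := by
        rw [List.getElem_append_left (by simp)]
        simp
      have hLb : ∀ p, (hp : p < b.length) → ∀ (h2 : p < ((b ++ [pvNul]) ++ pvFlat bs).length),
          ((b ++ [pvNul]) ++ pvFlat bs)[p]'h2 = b[p]'hp := by
        intro p hp h2
        rw [List.getElem_append_left (by simp; omega), List.getElem_append_left hp]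
      by_cases hsuf : mL <:+ b
      · -- the first block matches: pvAns < b.length, so "\0" would sit strictly inside b
        have hk : pvAns (b :: bs) mL = b.length - mL.length := by
          simp only [pvAns]; rw [if_pos hsuf]
        have hmlb : mL.length ≤ b.length := hsuf.length_le
        have hlt : i + mL.length < b.length := by omega
        have h2 : i + mL.length < ((b ++ [pvNul]) ++ pvFlat bs).length := by omega
        have hn := hchar mL.length (by omega) (by simp) h2
        simp only [List.getElem_concat_length] at hn
        rw [hLb (i + mL.length) hlt h2] at hn
        have hbb : pvNul ∉ b := hb b (by simp)
        exact hbb (by rw [hn]; exact List.getElem_mem _)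
      · have hk : pvAns (b :: bs) mL = b.length + 1 + pvAns bs mL := by
          simp only [pvAns]; rw [if_neg hsuf]
        by_cases hge : b.length + 1 ≤ i
        · -- the occurrence lies in the tail blocks
          have hdrop : ((b ++ [pvNul]) ++ pvFlat bs).drop i
              = (pvFlat bs).drop (i - (b.length + 1)) := by
            rw [List.drop_append]
            have h1 : (b ++ [pvNul]).drop i = [] := by
              apply List.drop_eq_nil_of_le
              simp only [List.length_append, List.length_cons, List.length_nil]
              omega
            rw [h1]
            have : i - (b ++ [pvNul]).length = i - (b.length + 1) := by
              simp only [List.length_append, List.length_cons, List.length_nil]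
            rw [this]; simp
          rw [hdrop] at hpre
          exact pv_min_prefix bs mL (fun b' h => hb b' (by simp [h])) hm
            (i - (b.length + 1)) (by omega) hpre
        · -- i inside the first block, which does not end with mL
          rcases Nat.lt_trichotomy (i + mL.length) b.length with hlt | heq | hgt
          · -- "\0" of the occurrence would sit strictly inside b
            have h2 : i + mL.length < ((b ++ [pvNul]) ++ pvFlat bs).length := by omega
            have hn := hchar mL.length (by omega) (by simp) h2
            simp only [List.getElem_concat_length] at hn
            rw [hLb (i + mL.length) hlt h2] at hn
            have hbb : pvNul ∉ b := hb b (by simp)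
            exact hbb (by rw [hn]; exact List.getElem_mem _)
          · -- the occurrence ends exactly at the end of b: mL would be a suffix of b
            apply hsuf
            have hlen : (b.drop i).length = mL.length := by
              rw [List.length_drop]; omega
            have heqL : mL = b.drop i := by
              apply List.ext_getElem (by omega)
              intro j hj1 hj2
              have h2 : i + j < ((b ++ [pvNul]) ++ pvFlat bs).length := by omega
              have hn := hchar j (by omega) (by simp; omega) h2
              rw [List.getElem_append_left hj1] at hn
              rw [hLb (i + j) (by omega) h2] at hn
              rw [hn]
              simp [List.getElem_drop]
            rw [heqL]
            exact List.drop_suffix i b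
          · -- the "\0" terminating b would sit inside mL
            have hj : b.length - i < mL.length := by omega
            have h2 : i + (b.length - i) < ((b ++ [pvNul]) ++ pvFlat bs).length := by omega
            have hn := hchar (b.length - i) (by omega) (by simp; omega) h2
            rw [List.getElem_append_left hj] at hn
            have hidx : i + (b.length - i) = b.length := by omega
            have h3 : ((b ++ [pvNul]) ++ pvFlat bs)[i + (b.length - i)]'h2 = pvNul := by
              simp only [hidx]
              exact hLnul
            rw [h3] at hn
            exact hm (by rw [← hn]; exact List.getElem_mem _)

theorem pv_find_flat (bs : List (List Char)) (mL : List Char)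
    (hb : ∀ b ∈ bs, pvNul ∉ b) (hm : pvNul ∉ mL) (hex : ∃ b ∈ bs, mL <:+ b) :
    PySem.Chars.find (pvFlat bs) (mL ++ [pvNul]) = ((pvAns bs mL : Nat) : Int) :=
  pv_find_eq_of _ _ _ (pv_exist_prefix bs mL hex) (pv_min_prefix bs mL hb hm)

-- ===== the offset dictionary =====
def pvKey (s : String) (k : Nat) : String := PySem.Str.slice s (some (k : Int)) none

def pvStep (st : PySem.Dict String Int × Int) (s : String) : PySem.Dict String Int × Int :=
  ((PySem.List.pyRange 0 (PySem.Str.len s + 1) 1).foldl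
     (fun d i => PySem.Dict.setdefault d (PySem.Str.slice s (some i) none) (st.2 + i)) st.1,
   st.2 + PySem.Str.len s + 1)

def pvPos (ms : List String) : PySem.Dict String Int :=
  ((pvKept ms).foldl pvStep (PySem.Dict.empty, 0)).1

theorem pv_key_toList (s : String) (k : Nat) :
    (pvKey s k).toList = s.toList.drop k := by
  rw [pvKey, PySem.Str.toList_slice]
  have h := PySem.List.slice_from s.toList (Int.natCast_nonneg k)
  simpa using h

theorem pv_inner_shape (s : String) (d : PySem.Dict String Int) (off : Int) :
    (PySem.List.pyRange 0 (PySem.Str.len s + 1) 1).foldl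
      (fun d i => PySem.Dict.setdefault d (PySem.Str.slice s (some i) none) (off + i)) d
    = (List.range (s.toList.length + 1)).foldl
      (fun d k => PySem.Dict.setdefault d (pvKey s k) (off + (k : Int))) d := by
  rw [PySem.List.pyRange_one]
  have h1 : ((PySem.Str.len s + 1) - 0).toNat = s.toList.length + 1 := by
    rw [PySem.Str.len_eq]; omega
  rw [h1, List.foldl_map]
  congr 1
  funext d k
  simp [pvKey]

theorem pv_getD_setdefault_contains (d : PySem.Dict String Int) (k m : String) (v : Int)
    (h : d.contains m = true) : (d.setdefault k v).getD m 0 = d.getD m 0 := by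
  by_cases hk : d.contains k = true
  · rw [PySem.Dict.setdefault_of_contains d v hk]
  · by_cases hkm : m = k
    · subst hkm; rw [h] at hk; exact absurd rfl hk
    · rw [PySem.Dict.getD_eq_get?_getD, PySem.Dict.get?_setdefault_of_ne d v hkm,
        ← PySem.Dict.getD_eq_get?_getD]

theorem pv_inner_contains (s m : String) : ∀ (ks : List Nat) (d : PySem.Dict String Int) (off : Int),
    ((ks.foldl (fun d k => PySem.Dict.setdefault d (pvKey s k) (off + (k : Int))) d).contains m)
      = (d.contains m || ks.any (fun k => m == pvKey s k))
  | [], d, off => by simp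
  | k0 :: ks, d, off => by
      rw [List.foldl_cons, pv_inner_contains s m ks _ off, PySem.Dict.contains_setdefault]
      simp [Bool.or_assoc, Bool.or_left_comm]

theorem pv_inner_preserve (s m : String) : ∀ (ks : List Nat) (d : PySem.Dict String Int) (off : Int),
    d.contains m = true →
    ((ks.foldl (fun d k => PySem.Dict.setdefault d (pvKey s k) (off + (k : Int))) d).getD m 0)
      = d.getD m 0
  | [], d, off => by simp
  | k0 :: ks, d, off => by
      intro h
      rw [List.foldl_cons]
      have h2 : (PySem.Dict.setdefault d (pvKey s k0) (off + (k0 : Int))).contains m = true := by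
        rw [PySem.Dict.contains_setdefault]
        simp [h]
      rw [pv_inner_preserve s m ks _ off h2, pv_getD_setdefault_contains d _ m _ h]

theorem pv_inner_getD (s m : String) : ∀ (ks : List Nat) (d : PySem.Dict String Int) (off : Int),
    d.contains m = false → (∀ k ∈ ks, k ≤ s.toList.length) →
    ((ks.foldl (fun d k => PySem.Dict.setdefault d (pvKey s k) (off + (k : Int))) d).getD m 0)
      = if ∃ k ∈ ks, pvKey s k = m then off + ((s.toList.length : Int) - (m.toList.length : Int))
        else 0
  | [], d, off => by
      intro hnc _
      simp [PySem.Dict.getD_of_not_contains d 0 hnc]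
  | k0 :: ks, d, off => by
      intro hnc hks
      rw [List.foldl_cons]
      by_cases hk : pvKey s k0 = m
      · have hcont : (PySem.Dict.setdefault d (pvKey s k0) (off + (k0 : Int))).contains m = true := by
          rw [PySem.Dict.contains_setdefault]
          simp [hk]
        rw [pv_inner_preserve s m ks _ off hcont]
        have hval : (PySem.Dict.setdefault d (pvKey s k0) (off + (k0 : Int))).getD m 0
            = off + (k0 : Int) := by
          rw [← hk, PySem.Dict.getD_setdefault_self,
            PySem.Dict.getD_of_not_contains d _ (by rw [hk]; exact hnc)]
        rw [hval, if_pos ⟨k0, by simp, hk⟩]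
        have hlen : m.toList.length = s.toList.length - k0 := by
          rw [← hk, pv_key_toList, List.length_drop]
        have hk0 : k0 ≤ s.toList.length := hks k0 (by simp)
        omega
      · have hnc2 : (PySem.Dict.setdefault d (pvKey s k0) (off + (k0 : Int))).contains m = false := by
          have hne : (m == pvKey s k0) = false := by
            simp only [beq_eq_false_iff_ne, ne_eq]
            exact fun h => hk h.symm
          rw [PySem.Dict.contains_setdefault, hne, Bool.false_or]
          exact hnc
        rw [pv_inner_getD s m ks _ off hnc2 (fun k h => hks k (by simp [h]))]
        have hiff : (∃ k ∈ ks, pvKey s k = m) ↔ (∃ k ∈ k0 :: ks, pvKey s k = m) := by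
          constructor
          · rintro ⟨k, h1, h2⟩; exact ⟨k, by simp [h1], h2⟩
          · rintro ⟨k, h1, h2⟩
            rcases List.mem_cons.mp h1 with rfl | h1
            · exact absurd h2 hk
            · exact ⟨k, h1, h2⟩
        by_cases hex : ∃ k ∈ ks, pvKey s k = m
        · rw [if_pos hex, if_pos (hiff.mp hex)]
        · rw [if_neg hex, if_neg (fun h => hex (hiff.mpr h))]

theorem pv_outer_preserve (m : String) : ∀ (ks : List String) (st : PySem.Dict String Int × Int),
    st.1.contains m = true →
    (((ks.foldl pvStep st).1).getD m 0 = st.1.getD m 0 ∧ ((ks.foldl pvStep st).1).contains m = true)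
  | [], st => fun h => ⟨rfl, h⟩
  | s :: ks, st => by
      intro h
      rw [List.foldl_cons]
      have hst : pvStep st s
          = ((List.range (s.toList.length + 1)).foldl
               (fun d k => PySem.Dict.setdefault d (pvKey s k) (st.2 + (k : Int))) st.1,
             st.2 + PySem.Str.len s + 1) := by
        rw [pvStep, pv_inner_shape]
      have h2 : (pvStep st s).1.contains m = true := by
        rw [hst, pv_inner_contains, h, Bool.true_or]
      obtain ⟨ih1, ih2⟩ := pv_outer_preserve m ks (pvStep st s) h2
      refine ⟨?_, ih2⟩
      rw [ih1, hst]
      exact pv_inner_preserve s m _ st.1 st.2 h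

theorem pv_suffix_key_iff (s m : String) :
    (∃ k ∈ List.range (s.toList.length + 1), pvKey s k = m) ↔ m.toList <:+ s.toList := by
  constructor
  · rintro ⟨k, hk, rfl⟩
    rw [pv_key_toList]
    exact List.drop_suffix k s.toList
  · intro hsuf
    obtain ⟨t, ht⟩ := hsuf
    refine ⟨t.length, ?_, ?_⟩
    · rw [List.mem_range]
      have : t.length + m.toList.length = s.toList.length := by rw [← ht]; simp
      omega
    · rw [← String.toList_inj, pv_key_toList, ← ht, List.drop_left]

theorem pv_outer_getD (m : String) : ∀ (ks : List String) (d : PySem.Dict String Int) (off : Int),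
    d.contains m = false → (∃ s ∈ ks, m.toList <:+ s.toList) →
    ((ks.foldl pvStep (d, off)).1).getD m 0
      = off + ((pvAns (ks.map String.toList) m.toList : Nat) : Int)
  | [], d, off => by rintro _ ⟨s, hs, -⟩; simp at hs
  | s :: ks, d, off => by
      intro hnc hex
      rw [List.foldl_cons]
      have hst : pvStep (d, off) s
          = ((List.range (s.toList.length + 1)).foldl
               (fun d k => PySem.Dict.setdefault d (pvKey s k) (off + (k : Int))) d,
             off + PySem.Str.len s + 1) := by
        rw [pvStep, pv_inner_shape]
      have hks : ∀ k ∈ List.range (s.toList.length + 1), k ≤ s.toList.length := by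
        intro k h; rw [List.mem_range] at h; omega
      by_cases hsuf : m.toList <:+ s.toList
      · -- first block matches
        have hkex : ∃ k ∈ List.range (s.toList.length + 1), pvKey s k = m :=
          (pv_suffix_key_iff s m).mpr hsuf
        have h1 : (pvStep (d, off) s).1.getD m 0
            = off + ((s.toList.length : Int) - (m.toList.length : Int)) := by
          rw [hst]
          rw [pv_inner_getD s m _ d off hnc hks, if_pos hkex]
        have h2 : (pvStep (d, off) s).1.contains m = true := by
          rw [hst, pv_inner_contains]
          obtain ⟨k, hk1, hk2⟩ := hkex
          have : (m == pvKey s k) = true := by simp [hk2]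
          have : List.any (List.range (s.toList.length + 1)) (fun k => m == pvKey s k) = true :=
            List.any_eq_true.mpr ⟨k, hk1, this⟩
          rw [this, Bool.or_true]
        obtain ⟨ih1, -⟩ := pv_outer_preserve m ks (pvStep (d, off) s) h2
        rw [ih1, h1]
        have hans : pvAns ((s :: ks).map String.toList) m.toList
            = s.toList.length - m.toList.length := by
          simp only [List.map_cons, pvAns]
          rw [if_pos hsuf]
        rw [hans]
        have := hsuf.length_le
        omega
      · -- first block does not match
        have hnc2 : (pvStep (d, off) s).1.contains m = false := by
          rw [hst, pv_inner_contains, hnc, Bool.false_or]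
          rw [List.any_eq_false]
          intro k hk
          have : ¬ m = pvKey s k := fun h =>
            hsuf ((pv_suffix_key_iff s m).mp ⟨k, hk, h.symm⟩)
          simpa using this
        have hex2 : ∃ s' ∈ ks, m.toList <:+ s'.toList := by
          obtain ⟨s', hs', h⟩ := hex
          rcases List.mem_cons.mp hs' with rfl | hs'
          · exact absurd h hsuf
          · exact ⟨s', hs', h⟩
        have hshape : pvStep (d, off) s = ((pvStep (d, off) s).1, off + PySem.Str.len s + 1) := by
          rw [hst]
        rw [hshape, pv_outer_getD m ks (pvStep (d, off) s).1 (off + PySem.Str.len s + 1) hnc2 hex2]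
        have hans : pvAns ((s :: ks).map String.toList) m.toList
            = s.toList.length + 1 + pvAns (ks.map String.toList) m.toList := by
          simp only [List.map_cons, pvAns]
          rw [if_neg hsuf]
        rw [hans, PySem.Str.len_eq]
        push_cast
        ring

theorem pv_pos_getD (ms : List String) (m : String)
    (hex : ∃ s ∈ pvKept ms, m.toList <:+ s.toList) :
    (pvPos ms).getD m 0 = ((pvAns ((pvKept ms).map String.toList) m.toList : Nat) : Int) := by
  rw [pvPos, pv_outer_getD m (pvKept ms) PySem.Dict.empty 0 (PySem.Dict.contains_empty m) hex]
  ring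

theorem pv_exists_maximal (ms : List String) (m : String) (hm : m ∈ ms) :
    ∃ x, pvMaxim ms x ∧ m.toList <:+ x.toList := by
  set cs := ms.filter (fun x => decide (m.toList <:+ x.toList)) with hcs
  have hmc : m ∈ cs := by
    rw [hcs, List.mem_filter]
    exact ⟨hm, by simp⟩
  have hne : cs ≠ [] := fun h => by rw [h] at hmc; simp at hmc
  obtain ⟨x, hx⟩ : ∃ x, x ∈ cs.argmax (fun x => x.toList.length) := by
    cases h : cs.argmax (fun x => x.toList.length) with
    | none => exact absurd (List.argmax_eq_none.mp h) hne
    | some x => exact ⟨x, by simp [Option.mem_def, h]⟩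
  have hxc : x ∈ cs := List.argmax_mem hx
  rw [hcs, List.mem_filter] at hxc
  obtain ⟨hxms, hxs⟩ := hxc
  rw [decide_eq_true_eq] at hxs
  refine ⟨x, ⟨hxms, ?_⟩, hxs⟩
  intro y hy hsufxy
  have hyc : y ∈ cs := by
    rw [hcs, List.mem_filter]
    exact ⟨hy, decide_eq_true (hxs.trans hsufxy)⟩
  have hle : y.toList.length ≤ x.toList.length :=
    List.le_of_mem_argmax (f := fun x : String => x.toList.length) hyc hx
  have heq : x.toList = y.toList := hsufxy.eq_of_length (le_antisymm hsufxy.length_le hle)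
  exact String.toList_inj.mp heq.symm

def pvCstr (M : String) : String :=
  String.ofList ('"' :: (PySem.Str.replace (PySem.Str.slice M none (some (-1)))
    (String.ofList [pvNul]) "\\0").toList ++ ['"'])

def pvMerged (ms : List String) : String := PySem.Str.join "" ((pvKept ms).map pvF)

theorem pv_A_eq (ms : List String) : parse_mnemonics ms =
    (pvCstr (PySem.Str.join "" (PySem.List.sorted (pvWalkT (pvBuild ms) [pvNul]) (fun x => x))),
     PySem.Str.join ","
       ((ms.map (fun m => PySem.Str.find
           (PySem.Str.join "" (PySem.List.sorted (pvWalkT (pvBuild ms) [pvNul]) (fun x => x)))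
           (pvF m))).map (fun n => PySem.Int.toStr n))) := rfl

theorem pv_B_eq (ms : List String) : parse_mnemonics_alt ms =
    (pvCstr (pvMerged ms),
     PySem.Str.join ","
       ((ms.map (fun m => PySem.Dict.getD (pvPos ms) m 0)).map (fun n => PySem.Int.toStr n))) := rfl

theorem pv_merged_toList (ms : List String) :
    (pvMerged ms).toList = pvFlat ((pvKept ms).map String.toList) := by
  rw [pvMerged]
  have h1 : (PySem.Str.join "" ((pvKept ms).map pvF)).toList
      = PySem.Chars.join [] (((pvKept ms).map pvF).map String.toList) := by
    simp [PySem.Str.join, String.toList_ofList]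
  rw [h1, pv_join_nil_flatten, pvFlat, List.map_map, List.map_map]
  apply congrArg
  apply List.map_congr_left
  intro m _
  simp [pvF]

theorem pv_dom_nul_notin (ms : List String) (hdom : Dom_parse_mnemonics ms)
    {m : String} (hm : m ∈ ms) : pvNul ∉ m.toList := by
  intro hc
  exact absurd (pv_dom_nul_lt ms hdom hm hc) (lt_irrefl pvNul)

-- ===== VERDICT (by name: the statement is the Claim_ definition above) =====
theorem parse_mnemonics_spec : Claim_equal_parse_mnemonics := by
  intro ms hdom
  show parse_mnemonics ms = parse_mnemonics_alt ms
  by_cases hms : ms = []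
  · subst hms; decide
  · rw [pv_A_eq, pv_B_eq, pv_sorted_walk ms hms hdom]
    refine Prod.ext rfl ?_
    show PySem.Str.join "," _ = PySem.Str.join "," _
    apply congrArg
    rw [List.map_map, List.map_map]
    apply List.map_congr_left
    intro m hm
    show PySem.Int.toStr (PySem.Str.find (pvMerged ms) (pvF m))
        = PySem.Int.toStr (PySem.Dict.getD (pvPos ms) m 0)
    apply congrArg
    obtain ⟨x, hmax, hsuf⟩ := pv_exists_maximal ms m hm
    have hxkept : x ∈ pvKept ms := by
      rw [pvKept, PySem.List.mem_sorted, pv_mem_keptRaw]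
      exact hmax
    have hex : ∃ s ∈ pvKept ms, m.toList <:+ s.toList := ⟨x, hxkept, hsuf⟩
    have hexb : ∃ b ∈ (pvKept ms).map String.toList, m.toList <:+ b :=
      ⟨x.toList, List.mem_map_of_mem hxkept, hsuf⟩
    have hb : ∀ b ∈ (pvKept ms).map String.toList, pvNul ∉ b := by
      intro b hbm
      rw [List.mem_map] at hbm
      obtain ⟨y, hy, rfl⟩ := hbm
      have hyms : y ∈ ms := by
        rw [pvKept, PySem.List.mem_sorted, pv_mem_keptRaw] at hy
        exact hy.1
      exact pv_dom_nul_notin ms hdom hyms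
    have hmn : pvNul ∉ m.toList := pv_dom_nul_notin ms hdom hm
    rw [PySem.Str.find_eq, pv_merged_toList]
    have hfm : (pvF m).toList = m.toList ++ [pvNul] := by simp [pvF]
    rw [hfm, pv_find_flat _ _ hb hmn hexb, pv_pos_getD ms m hex]
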